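-- pv_equiv track=rewrite | github.com/ian-quinn/ZonalModel | Scripts/mesh.py | pileup_list
-- ===== SOURCE A (Python) =====
-- def pileup_list(flatlist, dim_x, dim_y):
--     reclist = []
--     for i in range(dim_x * dim_y):
--         if i < len(flatlist):
--             reclist.append(flatlist[i])
--         else:
--             reclist.append(None)
--     nests = []
--     sub = []
--     for i in range(len(reclist)):
--         sub.append(reclist[i])
--         if len(sub) == dim_x:
--             nests.insert(0, sub)
--             sub = []
--     return nests
-- ===== SOURCE B (Python) =====
-- def pileup_list(flatlist, dim_x, dim_y):
--     if dim_x <= 0 or dim_y <= 0: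
--         return []
--     n = len(flatlist)
--     return [[flatlist[r * dim_x + c] if r * dim_x + c < n else None
--              for c in range(dim_x)]
--             for r in range(dim_y - 1, -1, -1)]
-- ===== Notes on version B (the rewrite author's own statement) =====
-- stated objective: simpler
-- what changed: Replaces A's two sequential accumulation loops (building a padded flat list, then chunking it into a front-insertion buffer) with a single nested comprehension over reversed row indices using direct index arithmetic.
import Mathlib
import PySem

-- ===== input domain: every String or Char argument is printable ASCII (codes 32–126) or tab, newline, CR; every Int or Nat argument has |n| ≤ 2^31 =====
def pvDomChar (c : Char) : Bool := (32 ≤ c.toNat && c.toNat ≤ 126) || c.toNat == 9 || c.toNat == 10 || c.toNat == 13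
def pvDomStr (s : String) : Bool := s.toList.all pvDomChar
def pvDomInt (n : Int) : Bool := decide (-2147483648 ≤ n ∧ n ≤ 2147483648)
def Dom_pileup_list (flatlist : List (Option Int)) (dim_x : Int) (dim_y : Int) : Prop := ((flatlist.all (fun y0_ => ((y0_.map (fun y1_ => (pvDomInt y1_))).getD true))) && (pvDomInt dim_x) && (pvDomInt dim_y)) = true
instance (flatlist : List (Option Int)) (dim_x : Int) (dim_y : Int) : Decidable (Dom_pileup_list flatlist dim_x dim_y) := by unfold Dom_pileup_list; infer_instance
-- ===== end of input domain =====

-- B replaces A's two accumulation loops (pad-then-chunk with front insertion) by one nested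
-- comprehension over reversed row indices with direct index arithmetic; objective: simpler.

-- ===== PORT A =====
def pileup_list (flatlist : List (Option Int)) (dim_x : Int) (dim_y : Int) : List (List (Option Int)) :=
  let reclist : List (Option Int) :=
    (PySem.List.pyRange 0 (dim_x * dim_y) 1).foldl
      (fun acc i =>
        if i < PySem.List.len flatlist then acc ++ [PySem.List.pyGetD flatlist i none]
        else acc ++ [none]) []
  let st :=
    (PySem.List.pyRange 0 (PySem.List.len reclist) 1).foldl
      (fun (st : List (List (Option Int)) × List (Option Int)) i =>
        let sub := st.2 ++ [PySem.List.pyGetD reclist i none]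
        if PySem.List.len sub = dim_x then (sub :: st.1, ([] : List (Option Int)))
        else (st.1, sub))
      ([], [])
  st.1

-- ===== PORT B =====
def pileup_list_alt (flatlist : List (Option Int)) (dim_x : Int) (dim_y : Int) : List (List (Option Int)) :=
  if dim_x ≤ 0 ∨ dim_y ≤ 0 then []
  else
    (PySem.List.pyRange (dim_y - 1) (-1) (-1)).map (fun r =>
      (PySem.List.pyRange 0 dim_x 1).map (fun c =>
        if r * dim_x + c < PySem.List.len flatlist
        then PySem.List.pyGetD flatlist (r * dim_x + c) none
        else none))

-- ===== PRECONDITION & SPEC =====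
def Spec_pileup_list (flatlist : List (Option Int)) (dim_x : Int) (dim_y : Int) (out : List (List (Option Int))) : Prop := out = pileup_list_alt flatlist dim_x dim_y
instance (flatlist : List (Option Int)) (dim_x : Int) (dim_y : Int) (out : List (List (Option Int))) : Decidable (Spec_pileup_list flatlist dim_x dim_y out) := by unfold Spec_pileup_list; infer_instance

-- ===== CLAIM (what is proved, stated in full; the proofs are below) =====
def Claim_equal_pileup_list : Prop := ∀ (flatlist : List (Option Int)) (dim_x : Int) (dim_y : Int), Dom_pileup_list flatlist dim_x dim_y → Spec_pileup_list flatlist dim_x dim_y (pileup_list flatlist dim_x dim_y)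

-- ===== LEMMAS AND PROOFS =====

-- The state-transformer of A's second loop, abstracted over the appended element.
def pvStep (dim_x : Int) (st : List (List (Option Int)) × List (Option Int)) (x : Option Int) :
    List (List (Option Int)) × List (Option Int) :=
  let sub := st.2 ++ [x]
  if PySem.List.len sub = dim_x then (sub :: st.1, ([] : List (Option Int)))
  else (st.1, sub)

-- When dim_x ≤ 0 the flush condition never fires: nests is unchanged.
theorem pv_no_flush (dim_x : Int) (hx : dim_x ≤ 0) :
    ∀ (l : List (Option Int)) (nests : List (List (Option Int))) (sub : List (Option Int)),
      (l.foldl (pvStep dim_x) (nests, sub)).1 = nests := by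
  intro l
  induction l with
  | nil => intro nests sub; rfl
  | cons x t ih =>
    intro nests sub
    have hcond : ¬ (PySem.List.len (sub ++ [x]) = dim_x) := by
      simp [PySem.List.len_eq]
      omega
    simp only [List.foldl_cons, pvStep, hcond]
    exact ih nests (sub ++ [x])

-- Folding a nonempty block that exactly completes a row flushes it once, at the end.
theorem pv_flush_end (dim_x : Int) :
    ∀ (l : List (Option Int)) (nests : List (List (Option Int))) (sub : List (Option Int)),
      l ≠ [] → ((sub.length : Int) + l.length = dim_x) →
      l.foldl (pvStep dim_x) (nests, sub) = ((sub ++ l) :: nests, []) := by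
  intro l
  induction l with
  | nil => intro _ _ h _; exact absurd rfl h
  | cons x t ih =>
    intro nests sub _ hlen
    rcases t with _ | ⟨y, t'⟩
    · have hcond : PySem.List.len (sub ++ [x]) = dim_x := by
        simp [PySem.List.len_eq]
        simp at hlen
        omega
      simp only [List.foldl_cons, List.foldl_nil, pvStep, if_pos hcond]
    · have hcond : ¬ (PySem.List.len (sub ++ [x]) = dim_x) := by
        simp [PySem.List.len_eq]
        simp at hlen
        omega
      rw [List.foldl_cons]
      have h1 : pvStep dim_x (nests, sub) x = (nests, sub ++ [x]) := by
        simp only [pvStep, if_neg hcond]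
      rw [h1, ih nests (sub ++ [x]) (by simp) (by simp at hlen ⊢; omega)]
      simp

-- Chunking dxN·k padded cells produces the k rows in reverse order.
theorem pv_chunk (dim_x : Int) (dxN : Nat) (hdx : dim_x = (dxN : Int)) (hpos : 0 < dxN)
    (f : Nat → Option Int) :
    ∀ (k : Nat) (nests : List (List (Option Int))),
      ((List.range (dxN * k)).map f).foldl (pvStep dim_x) (nests, []) =
        (((List.range k).map (fun r => (List.range dxN).map (fun c => f (r * dxN + c)))).reverse
            ++ nests, []) := by
  intro k
  induction k with
  | zero => intro nests; simp
  | succ k ih =>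
    intro nests
    have hsplit : List.range (dxN * (k + 1)) =
        List.range (dxN * k) ++ (List.range dxN).map (fun c => dxN * k + c) := by
      rw [Nat.mul_succ, List.range_add]
    rw [hsplit, List.map_append, List.foldl_append, ih]
    have hflush := pv_flush_end dim_x ((List.range dxN).map (fun c => f (dxN * k + c)))
      (((List.range k).map (fun r => (List.range dxN).map (fun c => f (r * dxN + c)))).reverse ++ nests)
      [] (by simp; omega) (by simp [hdx])
    rw [List.map_map]
    have hcomp : (f ∘ fun c => dxN * k + c) = (fun c => f (dxN * k + c)) := rfl
    rw [hcomp, hflush]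
    rw [List.range_succ, List.map_append, List.reverse_append]
    simp [Nat.mul_comm]

-- A's first loop builds the padded flat list as a map over the index range.
theorem pv_reclist (flatlist : List (Option Int)) (n : Int) :
    (PySem.List.pyRange 0 n 1).foldl
      (fun acc i =>
        if i < PySem.List.len flatlist then acc ++ [PySem.List.pyGetD flatlist i none]
        else acc ++ [none]) [] =
    (List.range n.toNat).map (fun k => flatlist.getD k none) := by
  have hbody : (fun (acc : List (Option Int)) (i : Int) =>
      if i < PySem.List.len flatlist then acc ++ [PySem.List.pyGetD flatlist i none]
      else acc ++ [none]) =
      fun acc i => acc ++ [if i < PySem.List.len flatlist then PySem.List.pyGetD flatlist i none else none] := by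
    funext acc i; split <;> rfl
  rw [hbody, PySem.List.foldl_append_singleton_eq_map]
  rw [PySem.List.pyRange_zero n, List.map_map]
  simp only [List.nil_append]
  apply List.map_congr_left
  intro k _
  simp only [Function.comp, PySem.List.len_eq, PySem.List.pyGetD_natCast]
  split
  · rfl
  · rename_i h
    rw [List.getD_eq_default]
    omega

theorem pileup_list_eq (flatlist : List (Option Int)) (dim_x : Int) (dim_y : Int) :
    pileup_list flatlist dim_x dim_y = pileup_list_alt flatlist dim_x dim_y := by
  unfold pileup_list
  simp only []
  rw [pv_reclist]
  set reclist := (List.range (dim_x * dim_y).toNat).map (fun k => flatlist.getD k none) with hrec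
  have hfold := PySem.List.foldl_pyRange_zero_pyGetD' reclist none (pvStep dim_x) ([], [])
  have hstep : (fun (st : List (List (Option Int)) × List (Option Int)) (i : Int) =>
      let sub := st.2 ++ [PySem.List.pyGetD reclist i none]
      if PySem.List.len sub = dim_x then (sub :: st.1, ([] : List (Option Int)))
      else (st.1, sub)) =
      fun st i => pvStep dim_x st (PySem.List.pyGetD reclist i none) := rfl
  rw [hstep]
  rw [show PySem.List.len reclist = (reclist.length : Int) from PySem.List.len_eq reclist]
  rw [hfold]
  by_cases hx : dim_x ≤ 0
  · rw [pv_no_flush dim_x hx reclist [] []]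
    rw [pileup_list_alt, if_pos (Or.inl hx)]
  · by_cases hy : dim_y ≤ 0
    · have hn : (dim_x * dim_y) ≤ 0 := by
        have : 0 ≤ dim_x := by omega
        exact mul_nonpos_of_nonneg_of_nonpos this hy
      have : (dim_x * dim_y).toNat = 0 := by omega
      rw [hrec, this]
      simp only [List.range_zero, List.map_nil, List.foldl_nil]
      rw [pileup_list_alt, if_pos (Or.inr hy)]
    · -- positive dimensions
      rw [not_le] at hx hy
      set dxN := dim_x.toNat with hdxN
      set dyN := dim_y.toNat with hdyN
      have hdx : dim_x = (dxN : Int) := by omega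
      have hdy : dim_y = (dyN : Int) := by omega
      have hN : (dim_x * dim_y).toNat = dxN * dyN := by
        rw [hdx, hdy, ← Int.natCast_mul, Int.toNat_natCast]
      rw [hrec, hN]
      rw [pv_chunk dim_x dxN hdx (by omega) (fun k => flatlist.getD k none) dyN []]
      rw [pileup_list_alt, if_neg (by simp; omega)]
      rw [PySem.List.pyRange_neg_one_eq_reverse]
      have : (-1 : Int) + 1 = 0 := by ring
      rw [this, show dim_y - 1 + 1 = dim_y by ring]
      rw [List.map_reverse, List.append_nil]
      dsimp only
      congr 1
      rw [hdy, PySem.List.pyRange_zero_nat dyN, List.map_map]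
      apply List.map_congr_left
      intro r _
      rw [Function.comp]
      rw [hdx, PySem.List.pyRange_zero_nat dxN, List.map_map]
      apply List.map_congr_left
      intro c _
      simp only [Function.comp, PySem.List.len_eq]
      have hidx : ((r : Int)) * (dxN : Int) + (c : Int) = ((r * dxN + c : Nat) : Int) := by
        push_cast; ring
      rw [hidx, PySem.List.pyGetD_natCast]
      split
      · rfl
      · rename_i h
        rw [List.getD_eq_default]
        omega

-- ===== VERDICT (by name: the statement is the Claim_ definition above) =====
theorem pileup_list_spec : Claim_equal_pileup_list := by
  intro flatlist dim_x dim_y _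
  unfold Spec_pileup_list
  exact pileup_list_eq flatlist dim_x dim_y
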